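-- pv_equiv track=rewrite | github.com/kszx11/notes_bot | src/notes_bot/indexer.py | _extract_heading_context
-- ===== SOURCE A (Python) =====
-- def _extract_heading_context(lines: list[str], start_line: int) -> str | None:
--     if start_line <= 1:
--         search_end = 0
--     else:
--         search_end = min(len(lines), start_line - 1)
--
--     for idx in range(search_end - 1, -1, -1):
--         stripped = lines[idx].strip()
--         if not stripped:
--             continue
--         if stripped.startswith("#"):
--             return stripped.lstrip("#").strip() or None
--     return None
-- ===== SOURCE B (Python) =====
-- def _extract_heading_context(lines: list[str], start_line: int) -> str | None:
--     search_end = 0 if start_line <= 1 else min(len(lines), start_line - 1)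
--     heads = [ln.strip() for ln in lines[:search_end] if ln.strip().startswith("#")]
--     if not heads:
--         return None
--     return heads[-1].lstrip("#").strip() or None
-- ===== Notes on version B (the rewrite author's own statement) =====
-- stated objective: simpler
-- what changed: Replaces the backward index loop with early return by a forward comprehension collecting all heading lines in the searched prefix, then formatting only the last one; the empty-line skip disappears (an empty strip never starts with '#').
import Mathlib
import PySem

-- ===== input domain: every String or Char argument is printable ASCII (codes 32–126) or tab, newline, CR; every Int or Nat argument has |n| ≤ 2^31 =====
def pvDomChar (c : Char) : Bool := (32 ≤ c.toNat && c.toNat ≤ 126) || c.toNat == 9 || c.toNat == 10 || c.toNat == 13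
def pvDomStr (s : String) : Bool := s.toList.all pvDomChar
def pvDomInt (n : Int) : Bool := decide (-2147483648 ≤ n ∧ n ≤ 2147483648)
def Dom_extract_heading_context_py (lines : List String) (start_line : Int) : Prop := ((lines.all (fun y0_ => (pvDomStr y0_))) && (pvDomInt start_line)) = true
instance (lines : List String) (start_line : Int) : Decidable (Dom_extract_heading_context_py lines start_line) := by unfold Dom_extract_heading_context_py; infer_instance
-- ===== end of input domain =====

-- B replaces A's backward index loop (first match, early return) by a forward
-- comprehension collecting the heading lines of the searched prefix, formatting only the last.
-- Return values only; neither version mutates its arguments.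

-- ===== PORT A =====
-- the backward loop for idx in range(search_end-1, -1, -1); n counts how many indices remain
def pvALoop (lines : List String) : Nat → Option String
  | 0 => none
  | n+1 =>
    let stripped := PySem.Str.strip ((PySem.List.pyGet? lines (n : Int)).getD "")
    if stripped = "" then pvALoop lines n
    else if PySem.Str.startswith stripped "#" then
      -- stripped.lstrip("#") ported by hand as dropWhile (= '#'); exact: lstrip with a
      -- one-character chars argument drops exactly the leading '#' characters
      let t := PySem.Str.strip (String.ofList (stripped.toList.dropWhile (· == '#')))
      if t = "" then none else some t
    else pvALoop lines n

def extract_heading_context_py (lines : List String) (start_line : Int) : Option String :=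
  let search_end : Int := if start_line ≤ 1 then 0 else min (lines.length : Int) (start_line - 1)
  pvALoop lines search_end.toNat

-- ===== PORT B =====
def extract_heading_context_py_alt (lines : List String) (start_line : Int) : Option String :=
  let search_end : Int := if start_line ≤ 1 then 0 else min (lines.length : Int) (start_line - 1)
  let heads := ((PySem.List.slice lines none (some search_end)).filter
      (fun ln => PySem.Str.startswith (PySem.Str.strip ln) "#")).map PySem.Str.strip
  match heads.getLast? with
  | none => none
  | some h =>
    -- h.lstrip("#") ported by hand as dropWhile (= '#'); exact for the single char '#'
    let t := PySem.Str.strip (String.ofList (h.toList.dropWhile (· == '#')))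
    if t = "" then none else some t

-- ===== PRECONDITION & SPEC =====
def Spec_extract_heading_context_py (lines : List String) (start_line : Int) (out : Option String) : Prop := out = extract_heading_context_py_alt lines start_line
instance (lines : List String) (start_line : Int) (out : Option String) : Decidable (Spec_extract_heading_context_py lines start_line out) := by unfold Spec_extract_heading_context_py; infer_instance

-- ===== CLAIM (what is proved, stated in full; the proofs are below) =====
def Claim_equal_extract_heading_context_py : Prop := ∀ (lines : List String) (start_line : Int), Dom_extract_heading_context_py lines start_line → Spec_extract_heading_context_py lines start_line (extract_heading_context_py lines start_line)

-- ===== LEMMAS AND PROOFS =====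

def pvPred (ln : String) : Bool := PySem.Str.startswith (PySem.Str.strip ln) "#"

def pvFinish (heads : List String) : Option String :=
  match heads.getLast? with
  | none => none
  | some h =>
    let t := PySem.Str.strip (String.ofList (h.toList.dropWhile (· == '#')))
    if t = "" then none else some t

theorem pvKey (lines : List String) (n : Nat) (h : n ≤ lines.length) :
    pvALoop lines n = pvFinish (((lines.take n).filter pvPred).map PySem.Str.strip) := by
  induction n with
  | zero => simp [pvALoop, pvFinish]
  | succ n ih =>
    have hn : n < lines.length := h
    have hget : PySem.List.pyGet? lines (n : Int) = some lines[n] := by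
      simp [hn]
    have htake : lines.take (n + 1) = lines.take n ++ [lines[n]] := by
      rw [List.take_add_one]; simp [hn]
    rw [htake]
    simp only [pvALoop, hget, Option.getD_some, List.filter_append, List.map_append]
    by_cases hstr : PySem.Str.strip lines[n] = ""
    · have hp : pvPred lines[n] = false := by
        unfold pvPred; rw [hstr]; decide
      simp only [List.filter_singleton, hp, cond_false, List.map_nil, List.append_nil,
        if_pos hstr]
      exact ih (Nat.le_of_lt hn)
    · by_cases hsw : PySem.Str.startswith (PySem.Str.strip lines[n]) "#" = true
      · have hp : pvPred lines[n] = true := hsw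
        have hfil : List.filter pvPred [lines[n]] = [lines[n]] := by
          simp only [List.filter_singleton, hp, cond_true]
        rw [hfil, if_neg hstr, if_pos hsw]
        unfold pvFinish
        rw [List.map_cons, List.map_nil, List.getLast?_concat]
      · have hp : pvPred lines[n] = false := by
          unfold pvPred; simpa using hsw
        simp only [List.filter_singleton, hp, cond_false, List.map_nil, List.append_nil,
          if_neg hstr, if_neg hsw]
        exact ih (Nat.le_of_lt hn)

-- ===== VERDICT (by name: the statement is the Claim_ definition above) =====
theorem extract_heading_context_py_spec : Claim_equal_extract_heading_context_py := by
  intro lines start_line _dom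
  unfold Spec_extract_heading_context_py extract_heading_context_py extract_heading_context_py_alt
  by_cases h1 : start_line ≤ 1
  · simp [h1, pvALoop, PySem.List.slice_to]
  · have h0 : (0 : Int) ≤ min (lines.length : Int) (start_line - 1) := by
      have : (1 : Int) < start_line := by omega
      simp; omega
    have hle : (min (lines.length : Int) (start_line - 1)).toNat ≤ lines.length := by
      omega
    simp only [h1, if_false, PySem.List.slice_to _ h0]
    rw [pvKey lines _ hle]
    unfold pvFinish pvPred
    rfl
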